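-- pv_equiv track=rewrite | github.com/fbuljan/advent-of-code-2025 | day10/first.py | min_presses
-- ===== SOURCE A (Python) =====
-- from collections import deque
--
-- def min_presses(goal_state: int, button_masks: list[int], num_lights: int) -> int | None:
--     start = 0
--     if goal_state == start:
--         return 0
--
--     visited = {start}
--     q = deque()
--     q.append((start, 0))
--
--     while q:
--         state, dist = q.popleft()
--
--         for mask in button_masks:
--             next_state = state ^ mask
--             if next_state == goal_state:
--                 return dist + 1
--             if next_state not in visited:
--                 visited.add(next_state)
--                 q.append((next_state, dist + 1))
--
--     return None
-- ===== SOURCE B (Python) =====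
-- def min_presses(goal_state: int, button_masks: list[int], num_lights: int) -> int | None:
--     # Dynamic programming over the button list instead of BFS over states:
--     # best maps each XOR value reachable from a subset of the buttons seen so
--     # far to the minimum number of presses producing it (pressing a button
--     # twice cancels, so an optimal solution presses each button at most once).
--     best = {0: 0}
--     for m in button_masks:
--         for s, d in list(best.items()):
--             t = s ^ m
--             if t not in best or d + 1 < best[t]:
--                 best[t] = d + 1
--     return best.get(goal_state)
-- ===== Notes on version B (the rewrite author's own statement) =====
-- stated objective: alternative
-- what changed: Replaced BFS over the state graph (queue + visited set) by dynamic programming over the button list: a dict mapping each XOR value achievable by a subset of the buttons seen so far to its minimum subset size, updated once per button; correct because pressing a button twice cancels, so the minimum number of presses equals the minimum size of a subset of buttons XORing to the goal. B always builds the full table, so unlike A it does not benefit from an early exit when the goal is found quickly.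
import Mathlib
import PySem

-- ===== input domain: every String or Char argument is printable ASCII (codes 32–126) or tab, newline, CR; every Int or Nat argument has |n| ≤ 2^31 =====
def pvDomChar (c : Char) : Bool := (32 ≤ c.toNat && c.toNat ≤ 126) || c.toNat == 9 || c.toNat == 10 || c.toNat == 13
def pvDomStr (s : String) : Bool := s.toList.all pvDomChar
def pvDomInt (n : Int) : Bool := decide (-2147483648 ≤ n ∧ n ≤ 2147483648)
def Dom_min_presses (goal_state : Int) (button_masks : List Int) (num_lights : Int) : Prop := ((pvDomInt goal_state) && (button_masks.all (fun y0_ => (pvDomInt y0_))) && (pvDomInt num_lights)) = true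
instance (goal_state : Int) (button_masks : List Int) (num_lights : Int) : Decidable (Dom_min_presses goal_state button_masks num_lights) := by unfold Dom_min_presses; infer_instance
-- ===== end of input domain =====

-- B replaces A's BFS over states (queue + visited set) by dynamic programming over the
-- button list: a table mapping each reachable XOR value to its minimum subset size;
-- alternative algorithm of similar cost, no speed claim.

-- ===== PORT A =====
-- inner 'for mask in button_masks' body of A's while-loop: goal check, then visited check / enqueue
def stepA (goal state dist : Int) (masks : List Int) (q : List (Int × Int)) (v : PySem.Set Int) : Option Int × List (Int × Int) × PySem.Set Int :=
  match masks with
  | [] => (none, q, v)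
  | m :: ms =>
    let t := PySem.Int.bxor state m
    if t = goal then (some (dist + 1), q, v)
    else if PySem.Set.contains v t then stepA goal state dist ms q v
    else stepA goal state dist ms (q ++ [(t, dist + 1)]) (PySem.Set.add v t)

-- A's 'while q' loop; fuel only bounds the pops: every pushed state is a fresh member of
-- visited, which lies in the GF(2) span of masks (≤ 2^|masks| states), so fuel never runs out.
def runA (fuel : Nat) (goal : Int) (masks : List Int) (q : List (Int × Int)) (v : PySem.Set Int) : Option Int :=
  match fuel, q with
  | 0, _ => none
  | _ + 1, [] => none
  | fuel + 1, (state, dist) :: rest =>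
    match stepA goal state dist masks rest v with
    | (some r, _, _) => some r
    | (none, q', v') => runA fuel goal masks q' v'

def min_presses (goal_state : Int) (button_masks : List Int) (num_lights : Int) : Option Int :=
  if goal_state = 0 then some 0
  else runA (2 ^ button_masks.length + 1) goal_state button_masks [((0 : Int), (0 : Int))] (PySem.Set.ofList [0])

-- ===== PORT B =====
-- inner 'for s, d in list(best.items())' loop of B: relax t = s ^ m against the running table
def dpInner (m : Int) (cur : List (Int × Int)) (best : PySem.Dict Int Int) : PySem.Dict Int Int :=
  match cur with
  | [] => best
  | (s, d) :: rest =>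
    let t := PySem.Int.bxor s m
    let best' :=
      match PySem.Dict.get? best t with
      | none => PySem.Dict.insert best t (d + 1)
      | some c => if d + 1 < c then PySem.Dict.insert best t (d + 1) else best
    dpInner m rest best'

def min_presses_alt (goal_state : Int) (button_masks : List Int) (num_lights : Int) : Option Int :=
  let best := button_masks.foldl (fun b m => dpInner m (PySem.Dict.items b) b) (PySem.Dict.insert PySem.Dict.empty 0 0)
  PySem.Dict.get? best goal_state

-- ===== PRECONDITION & SPEC =====
def Spec_min_presses (goal_state : Int) (button_masks : List Int) (num_lights : Int) (out : Option Int) : Prop := out = min_presses_alt goal_state button_masks num_lights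
instance (goal_state : Int) (button_masks : List Int) (num_lights : Int) (out : Option Int) : Decidable (Spec_min_presses goal_state button_masks num_lights out) := by unfold Spec_min_presses; infer_instance

-- ===== CLAIM (what is proved, stated in full; the proofs are below) =====
def Claim_equal_min_presses : Prop := ∀ (goal_state : Int) (button_masks : List Int) (num_lights : Int), Dom_min_presses goal_state button_masks num_lights → Spec_min_presses goal_state button_masks num_lights (min_presses goal_state button_masks num_lights)

-- ===== LEMMAS AND PROOFS =====

-- ---- XOR algebra: PySem.Int.bxor through the (magnitude, sign) representation ----
def xDec (a : Int) : Nat × Bool := if 0 ≤ a then (a.toNat, false) else ((-a - 1).toNat, true)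
def xEnc (p : Nat × Bool) : Int := cond p.2 (-(p.1 : Int) - 1) (p.1 : Int)

lemma xDec_xEnc (p : Nat × Bool) : xDec (xEnc p) = p := by
  obtain ⟨n, b⟩ := p
  cases b <;> simp [xDec, xEnc] <;> omega

lemma bxor_eq_enc (a b : Int) :
    PySem.Int.bxor a b = xEnc ((xDec a).1 ^^^ (xDec b).1, xor (xDec a).2 (xDec b).2) := by
  unfold PySem.Int.bxor xDec xEnc
  split_ifs <;> simp

lemma bxor_assoc (a b c : Int) :
    PySem.Int.bxor (PySem.Int.bxor a b) c = PySem.Int.bxor a (PySem.Int.bxor b c) := by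
  simp [bxor_eq_enc, xDec_xEnc, Nat.xor_assoc, Bool.xor_assoc]

lemma zero_bxor (a : Int) : PySem.Int.bxor 0 a = a := by
  rw [PySem.Int.bxor_comm]; exact PySem.Int.bxor_zero a

lemma bxor_cancel (x m : Int) : PySem.Int.bxor (PySem.Int.bxor x m) m = x := by
  rw [bxor_assoc, PySem.Int.bxor_self, PySem.Int.bxor_zero]

lemma bxor_left_comm (a b c : Int) :
    PySem.Int.bxor a (PySem.Int.bxor b c) = PySem.Int.bxor b (PySem.Int.bxor a c) := by
  rw [← bxor_assoc, PySem.Int.bxor_comm a b, bxor_assoc]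

lemma bxor_eq_iff (s m x : Int) : PySem.Int.bxor s m = x ↔ s = PySem.Int.bxor x m := by
  constructor
  · intro h; rw [← h, bxor_cancel]
  · intro h; rw [h, bxor_cancel]

-- ---- XOR of a list ----
def xorList (l : List Int) : Int := l.foldr PySem.Int.bxor 0

lemma xorList_nil : xorList [] = 0 := rfl
lemma xorList_cons (a : Int) (l : List Int) : xorList (a :: l) = PySem.Int.bxor a (xorList l) := rfl

lemma xorList_append (l₁ l₂ : List Int) :
    xorList (l₁ ++ l₂) = PySem.Int.bxor (xorList l₁) (xorList l₂) := by
  induction l₁ with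
  | nil => simp [xorList_nil, zero_bxor]
  | cons a t ih => simp [xorList_cons, ih, bxor_assoc]

lemma xorList_perm {l₁ l₂ : List Int} (h : List.Perm l₁ l₂) : xorList l₁ = xorList l₂ := by
  induction h with
  | nil => rfl
  | cons a _ ih => simp [xorList_cons, ih]
  | swap a b l => simp [xorList_cons, bxor_left_comm]
  | trans _ _ ih₁ ih₂ => exact ih₁.trans ih₂

-- ---- reachability predicates ----
def SeqLE (masks : List Int) (k : Nat) (x : Int) : Prop :=
  ∃ l : List Int, (∀ m ∈ l, m ∈ masks) ∧ l.length ≤ k ∧ xorList l = x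

def SubLE (masks : List Int) (k : Nat) (x : Int) : Prop :=
  ∃ l : List Int, List.Sublist l masks ∧ l.length ≤ k ∧ xorList l = x

def Rch (masks : List Int) (x : Int) : Prop :=
  ∃ l : List Int, List.Sublist l masks ∧ xorList l = x

def SeqEx (masks : List Int) (k : Nat) (x : Int) : Prop :=
  SeqLE masks k x ∧ ∀ j, j < k → ¬ SeqLE masks j x

def MnSub (masks : List Int) (x : Int) (k : Nat) : Prop :=
  SubLE masks k x ∧ ∀ j, SubLE masks j x → k ≤ j

lemma SeqLE_mono {masks : List Int} {k k' : Nat} {x : Int} (h : k ≤ k') :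
    SeqLE masks k x → SeqLE masks k' x := by
  rintro ⟨l, h1, h2, h3⟩; exact ⟨l, h1, h2.trans h, h3⟩

lemma SeqLE_zero {masks : List Int} {x : Int} : SeqLE masks 0 x ↔ x = 0 := by
  constructor
  · rintro ⟨l, _, h2, h3⟩
    have : l = [] := List.length_eq_zero_iff.1 (Nat.le_zero.1 h2)
    subst this; exact h3.symm
  · rintro rfl; exact ⟨[], by simp, by simp, rfl⟩

lemma SeqLE_succ {masks : List Int} {k : Nat} {x : Int} :
    SeqLE masks (k + 1) x ↔ SeqLE masks k x ∨ ∃ m ∈ masks, SeqLE masks k (PySem.Int.bxor x m) := by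
  constructor
  · rintro ⟨l, h1, h2, h3⟩
    match l with
    | [] => exact Or.inl ⟨[], by simp, by simp, h3⟩
    | m :: t =>
      refine Or.inr ⟨m, h1 m (by simp), t, fun a ha => h1 a (by simp [ha]), ?_, ?_⟩
      · simpa using Nat.le_of_succ_le_succ h2
      · rw [← h3, xorList_cons, PySem.Int.bxor_comm m, bxor_cancel]
  · rintro (h | ⟨m, hm, l, h1, h2, h3⟩)
    · exact SeqLE_mono (Nat.le_succ k) h
    · refine ⟨m :: l, ?_, by simpa using Nat.succ_le_succ h2, ?_⟩
      · intro a ha; rcases List.mem_cons.1 ha with rfl | ha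
        · exact hm
        · exact h1 a ha
      · rw [xorList_cons, h3, PySem.Int.bxor_comm m, bxor_cancel]

lemma SeqLE_step {masks : List Int} {k : Nat} {s m : Int}
    (h : SeqLE masks k s) (hm : m ∈ masks) : SeqLE masks (k + 1) (PySem.Int.bxor s m) := by
  refine SeqLE_succ.2 (Or.inr ⟨m, hm, ?_⟩)
  rwa [bxor_cancel]

-- a sequence of button presses reduces to a subset of the buttons (duplicates cancel)
lemma seq_to_sub {masks : List Int} :
    ∀ n (l : List Int), l.length ≤ n → (∀ m ∈ l, m ∈ masks) →
      ∃ l', List.Sublist l' masks ∧ l'.length ≤ l.length ∧ xorList l' = xorList l := by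
  intro n
  induction n with
  | zero =>
    intro l hl _
    have : l = [] := List.length_eq_zero_iff.1 (Nat.le_zero.1 hl)
    subst this; exact ⟨[], List.nil_sublist _, by simp, rfl⟩
  | succ n ih =>
    intro l hl hmem
    by_cases hnd : l.Nodup
    · have hsp : List.Subperm l masks := hnd.subperm (fun x hx => hmem x hx)
      obtain ⟨t, hperm, hsl⟩ := hsp
      exact ⟨t, hsl, le_of_eq hperm.length_eq, xorList_perm hperm⟩
    · obtain ⟨a, hdup⟩ := List.exists_duplicate_iff_not_nodup.2 hnd
      have ha1 : a ∈ l := hdup.mem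
      have ha2 : a ∈ l.erase a := by
        have h2 := List.duplicate_iff_two_le_count.1 hdup
        have h3 : List.count a (l.erase a) = List.count a l - 1 := List.count_erase_self
        have : 0 < (l.erase a).count a := by
          simp only [List.count_erase_self]
          omega
        exact List.count_pos_iff.1 this
      set t := (l.erase a).erase a with ht
      have hperm : List.Perm l (a :: a :: t) :=
        (List.perm_cons_erase ha1).trans ((List.perm_cons_erase ha2).cons a)
      have hlen : l.length = t.length + 2 := by
        have h1 := hperm.length_eq; simpa using h1
      have hx : xorList l = xorList t := by
        rw [xorList_perm hperm, xorList_cons, xorList_cons, ← bxor_assoc,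
          PySem.Int.bxor_self, zero_bxor]
      have hmem' : ∀ m ∈ t, m ∈ masks := fun m hm => hmem m (hperm.symm.subset (by simp [hm]))
      obtain ⟨l', hs, hle, hxl⟩ := ih t (by omega) hmem'
      exact ⟨l', hs, by omega, hxl.trans hx.symm⟩

lemma SeqLE_iff_SubLE {masks : List Int} {k : Nat} {x : Int} :
    SeqLE masks k x ↔ SubLE masks k x := by
  constructor
  · rintro ⟨l, h1, h2, h3⟩
    obtain ⟨l', hs, hle, hxl⟩ := seq_to_sub l.length l (le_refl _) h1
    exact ⟨l', hs, hle.trans h2, hxl.trans h3⟩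
  · rintro ⟨l, h1, h2, h3⟩
    exact ⟨l, fun m hm => h1.subset hm, h2, h3⟩

lemma Rch_of_SubLE {masks : List Int} {k : Nat} {x : Int} (h : SubLE masks k x) : Rch masks x := by
  obtain ⟨l, h1, _, h3⟩ := h; exact ⟨l, h1, h3⟩

-- every level below the minimal distance of a reachable state is populated
lemma level_nonempty {masks : List Int} {K : Nat} {goal : Int}
    (hK : SeqEx masks K goal) {d : Nat} (hd : d ≤ K) : ∃ x, SeqEx masks d x := by
  obtain ⟨⟨l, hm, hl, hx⟩, hmin⟩ := hK
  have hlen : l.length = K := by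
    rcases Nat.lt_or_ge l.length K with h | h
    · exact absurd ⟨l, hm, le_refl _, hx⟩ (hmin l.length h)
    · omega
  refine ⟨xorList (l.drop (K - d)), ⟨l.drop (K - d), fun m hm' => hm m (List.mem_of_mem_drop hm'), by simp [hlen]; omega, rfl⟩, ?_⟩
  rintro j hj ⟨l', hm', hl', hx'⟩
  have hcomp : SeqLE masks (K - d + j) goal := by
    refine ⟨l.take (K - d) ++ l', ?_, ?_, ?_⟩
    · intro m hmm
      rcases List.mem_append.1 hmm with h | h
      · exact hm m (List.mem_of_mem_take h)
      · exact hm' m h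
    · simp [hlen]; omega
    · rw [xorList_append, hx', ← xorList_append, List.take_append_drop, hx]
  exact hmin (K - d + j) (by omega) hcomp

-- ---- span bound: at most 2^|masks| reachable states ----
def spanList (masks : List Int) : List Int := masks.sublists.map xorList

lemma length_spanList (masks : List Int) : (spanList masks).length = 2 ^ masks.length := by
  simp [spanList, List.length_sublists]

lemma mem_spanList_of_rch {masks : List Int} {x : Int} (h : Rch masks x) : x ∈ spanList masks := by
  obtain ⟨l, h1, h3⟩ := h
  exact List.mem_map.2 ⟨l, List.mem_sublists.2 h1, h3⟩

lemma card_bound {masks : List Int} (v : List Int) (hnd : v.Nodup)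
    (hsub : ∀ x ∈ v, x ∈ spanList masks) : v.length ≤ 2 ^ masks.length := by
  calc v.length = v.toFinset.card := (List.toFinset_card_of_nodup hnd).symm
    _ ≤ (spanList masks).toFinset.card := by
        apply Finset.card_le_card
        intro x hx
        exact List.mem_toFinset.2 (hsub x (List.mem_toFinset.1 hx))
    _ ≤ (spanList masks).length := List.toFinset_card_le _
    _ = 2 ^ masks.length := length_spanList masks

-- ---- proof-side level-synchronous BFS, and its equivalence to A's queue BFS ----
def stepL (goal s depth : Int) (masks : List Int) (nxt : List Int) (v : PySem.Set Int) : Option Int × List Int × PySem.Set Int :=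
  match masks with
  | [] => (none, nxt, v)
  | m :: ms =>
    let t := PySem.Int.bxor s m
    if t = goal then (some (depth + 1), nxt, v)
    else if PySem.Set.contains v t then stepL goal s depth ms nxt v
    else stepL goal s depth ms (nxt ++ [t]) (PySem.Set.add v t)

def runL (fuel : Nat) (goal : Int) (masks : List Int) (frontier nxt : List Int) (depth : Int) (v : PySem.Set Int) : Option Int :=
  match fuel, frontier, nxt with
  | 0, _, _ => none
  | _ + 1, [], [] => none
  | fuel + 1, [], n :: ns => runL (fuel + 1) goal masks (n :: ns) [] (depth + 1) v
  | fuel + 1, s :: rest, nxt =>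
    match stepL goal s depth masks nxt v with
    | (some r, _, _) => some r
    | (none, nxt', v') => runL fuel goal masks rest nxt' depth v'
  termination_by (fuel, if frontier.isEmpty then 1 else 0)
  decreasing_by
  · exact Prod.Lex.right _ (by simp)
  · exact Prod.Lex.left _ _ (Nat.lt_succ_self _)

-- one state's expansion: A's queue is the pending level-d states X followed by the next level
lemma step_eq (goal s d : Int) (masks : List Int) :
    ∀ (nxt : List Int) (X : List (Int × Int)) (v : PySem.Set Int),
      stepA goal s d masks (X ++ nxt.map (fun t => (t, d + 1))) v =
        ((stepL goal s d masks nxt v).1,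
         X ++ ((stepL goal s d masks nxt v).2.1).map (fun t => (t, d + 1)),
         (stepL goal s d masks nxt v).2.2) := by
  induction masks with
  | nil => intro nxt X v; simp [stepA, stepL]
  | cons m ms ih =>
    intro nxt X v
    simp only [stepA, stepL]
    split_ifs with h1 h2
    · rfl
    · exact ih nxt X v
    · rw [show (X ++ nxt.map (fun t => (t, d + 1))) ++ [(PySem.Int.bxor s m, d + 1)]
            = X ++ (nxt ++ [PySem.Int.bxor s m]).map (fun t => (t, d + 1)) by
          simp [List.append_assoc]]
      exact ih (nxt ++ [PySem.Int.bxor s m]) X (PySem.Set.add v (PySem.Int.bxor s m))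

-- the loops agree: A's queue is exactly the current frontier at depth d followed by nxt at depth d+1
lemma run_eq (goal : Int) (masks : List Int) :
    ∀ (fuel : Nat) (cur nxt : List Int) (d : Int) (v : PySem.Set Int),
      runA fuel goal masks (cur.map (fun t => (t, d)) ++ nxt.map (fun t => (t, d + 1))) v =
        runL fuel goal masks cur nxt d v := by
  intro fuel cur nxt d v
  induction fuel, cur, nxt, d, v using runL.induct goal masks with
  | case1 => simp [runA]; rw [runL]
  | case2 => simp [runA]; rw [runL]
  | case3 d v fuel n ns ih =>
    rw [runL, ← ih]
    simp
  | case4 d v fuel s rest nxt r nxt2 v2 hb =>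
    rw [runL]
    simp only [List.map_cons, List.cons_append, runA]
    rw [step_eq goal s d masks nxt (rest.map (fun t => (t, d))) v, hb]
  | case5 d v fuel s rest nxt nxt2 v2 hb ih =>
    rw [runL]
    simp only [List.map_cons, List.cons_append, runA]
    rw [step_eq goal s d masks nxt (rest.map (fun t => (t, d))) v, hb]
    simpa using ih

-- ---- characterization of one frontier-state expansion ----
lemma stepL_hit {goal s : Int} {masks : List Int} (depth : Int)
    (h : ∃ m ∈ masks, PySem.Int.bxor s m = goal) :
    ∀ (nxt : List Int) (v : PySem.Set Int), (stepL goal s depth masks nxt v).1 = some (depth + 1) := by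
  induction masks with
  | nil => rcases h with ⟨m, hm, _⟩; exact absurd hm (List.not_mem_nil)
  | cons m ms ih =>
    intro nxt v
    simp only [stepL]
    split_ifs with h1 h2
    · rfl
    · rcases h with ⟨m', hm', he⟩
      rcases List.mem_cons.1 hm' with rfl | hm'
      · exact absurd he h1
      · exact ih ⟨m', hm', he⟩ nxt v
    · rcases h with ⟨m', hm', he⟩
      rcases List.mem_cons.1 hm' with rfl | hm'
      · exact absurd he h1
      · exact ih ⟨m', hm', he⟩ _ _

lemma stepL_nohit {goal s : Int} {masks : List Int} (depth : Int) :
    ∀ (nxt : List Int) (v : PySem.Set Int), (∀ m ∈ masks, PySem.Int.bxor s m ≠ goal) → v.Nodup →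
    ∃ nxt' v', stepL goal s depth masks nxt v = (none, nxt', v') ∧
      (∀ x, x ∈ v' ↔ x ∈ v ∨ ∃ m ∈ masks, x = PySem.Int.bxor s m) ∧
      (∀ x, x ∈ nxt' ↔ x ∈ nxt ∨ (x ∉ v ∧ ∃ m ∈ masks, x = PySem.Int.bxor s m)) ∧
      v'.length + nxt.length = v.length + nxt'.length ∧
      v'.Nodup := by
  induction masks with
  | nil =>
    intro nxt v _ hnd
    exact ⟨nxt, v, rfl, by simp, by simp, by ring, hnd⟩
  | cons m ms ih =>
    intro nxt v hno hnd
    have hne : PySem.Int.bxor s m ≠ goal := hno m (by simp)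
    simp only [stepL, if_neg hne]
    by_cases hc : PySem.Set.contains v (PySem.Int.bxor s m)
    · rw [if_pos hc]
      have hcm : PySem.Int.bxor s m ∈ v := (PySem.Set.contains_iff v _).1 hc
      obtain ⟨nxt', v', heq, hv, hn, hl, hnd'⟩ := ih nxt v (fun a ha => hno a (by simp [ha])) hnd
      refine ⟨nxt', v', heq, ?_, ?_, hl, hnd'⟩
      · intro x
        rw [hv x]
        constructor
        · rintro (h | ⟨m', hm', rfl⟩)
          · exact Or.inl h
          · exact Or.inr ⟨m', by simp [hm'], rfl⟩
        · rintro (h | ⟨m', hm', rfl⟩)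
          · exact Or.inl h
          · rcases List.mem_cons.1 hm' with rfl | hm'
            · exact Or.inl hcm
            · exact Or.inr ⟨m', hm', rfl⟩
      · intro x
        rw [hn x]
        constructor
        · rintro (h | ⟨hxv, m', hm', rfl⟩)
          · exact Or.inl h
          · exact Or.inr ⟨hxv, m', by simp [hm'], rfl⟩
        · rintro (h | ⟨hxv, m', hm', rfl⟩)
          · exact Or.inl h
          · rcases List.mem_cons.1 hm' with rfl | hm'
            · exact absurd hcm hxv
            · exact Or.inr ⟨hxv, m', hm', rfl⟩
    · rw [if_neg hc]
      have hcm : PySem.Int.bxor s m ∉ v := fun h => hc ((PySem.Set.contains_iff v _).2 h)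
      have hadd : PySem.Set.add v (PySem.Int.bxor s m) = v ++ [PySem.Int.bxor s m] :=
        PySem.Set.add_of_not_mem hcm
      obtain ⟨nxt', v', heq, hv, hn, hl, hnd'⟩ :=
        ih (nxt ++ [PySem.Int.bxor s m]) (PySem.Set.add v (PySem.Int.bxor s m))
          (fun a ha => hno a (by simp [ha]))
          (PySem.Set.nodup_add v _ hnd)
      refine ⟨nxt', v', heq, ?_, ?_, ?_, hnd'⟩
      · intro x
        rw [hv x, hadd]
        constructor
        · rintro (h | ⟨m', hm', rfl⟩)
          · rcases List.mem_append.1 h with h | h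
            · exact Or.inl h
            · exact Or.inr ⟨m, by simp, by simpa using h⟩
          · exact Or.inr ⟨m', by simp [hm'], rfl⟩
        · rintro (h | ⟨m', hm', rfl⟩)
          · exact Or.inl (List.mem_append.2 (Or.inl h))
          · rcases List.mem_cons.1 hm' with rfl | hm'
            · exact Or.inl (by simp)
            · exact Or.inr ⟨m', hm', rfl⟩
      · intro x
        rw [hn x, hadd]
        constructor
        · rintro (h | ⟨hxv, m', hm', rfl⟩)
          · rcases List.mem_append.1 h with h | h
            · exact Or.inl h
            · have hx' : x = PySem.Int.bxor s m := by simpa using h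
              subst hx'
              exact Or.inr ⟨hcm, m, by simp, rfl⟩
          · exact Or.inr ⟨fun hx => hxv (List.mem_append.2 (Or.inl hx)), m', by simp [hm'], rfl⟩
        · rintro (h | ⟨hxv, m', hm', rfl⟩)
          · exact Or.inl (List.mem_append.2 (Or.inl h))
          · rcases List.mem_cons.1 hm' with rfl | hm'
            · exact Or.inl (by simp)
            · by_cases hx : PySem.Int.bxor s m' = PySem.Int.bxor s m
              · exact Or.inl (by simp [hx])
              · refine Or.inr ⟨?_, m', hm', rfl⟩
                intro hmem
                rcases List.mem_append.1 hmem with h | h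
                · exact hxv h
                · exact hx (by simpa using h)
      · rw [hadd] at hl; simp at hl; omega

-- ---- the BFS returns the minimal distance when the goal is reachable ----
lemma runL_reach {goal : Int} {masks : List Int} {K : Nat} (hK : SeqEx masks K goal) :
    ∀ (fuel : Nat) (F nxt : List Int) (depth : Int) (v : PySem.Set Int) (dN : Nat),
      depth = (dN : Int) →
      dN + 1 ≤ K →
      (∀ x, x ∈ v ↔ (SeqLE masks dN x ∨ x ∈ nxt)) →
      (∀ s ∈ F, SeqEx masks dN s) →
      (∀ x, SeqEx masks (dN + 1) x → x ∈ nxt ∨ ∃ s ∈ F, ∃ m ∈ masks, PySem.Int.bxor s m = x) →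
      (∀ x ∈ nxt, SeqEx masks (dN + 1) x) →
      goal ∉ nxt →
      v.Nodup →
      F.length + nxt.length + 2 ^ masks.length + 1 ≤ fuel + v.length →
      runL fuel goal masks F nxt depth v = some ((K : Nat) : Int) := by
  intro fuel F nxt depth v
  induction fuel, F, nxt, depth, v using runL.induct goal masks with
  | case1 x1 x2 x3 x4 =>
    intro dN hdep hle hv hF hgen hnxt hgoal hnd hfuel
    exfalso
    have hvs : x4.length ≤ 2 ^ masks.length := by
      refine card_bound x4 hnd ?_
      intro x hx
      rcases (hv x).1 hx with h | h
      · exact mem_spanList_of_rch (Rch_of_SubLE (SeqLE_iff_SubLE.1 (SeqLE_mono (Nat.le_succ dN) h)))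
      · exact mem_spanList_of_rch (Rch_of_SubLE (SeqLE_iff_SubLE.1 (hnxt x h).1))
    omega
  | case2 x1 x2 x3 =>
    intro dN hdep hle hv hF hgen hnxt hgoal hnd hfuel
    exfalso
    obtain ⟨x, hx⟩ := level_nonempty hK (d := dN + 1) hle
    rcases hgen x hx with h | ⟨s, hs, _⟩
    · exact List.not_mem_nil h
    · exact List.not_mem_nil hs
  | case3 depth v fuel n ns ih =>
    intro dN hdep hle hv hF hgen hnxt hgoal hnd hfuel
    rw [runL]
    have hlt : dN + 1 < K := by
      rcases Nat.lt_or_ge (dN + 1) K with h | h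
      · exact h
      · exfalso
        have hKd : dN + 1 = K := le_antisymm hle h
        rcases hgen goal (hKd ▸ hK) with h' | ⟨s, hs, _⟩
        · exact hgoal h'
        · exact List.not_mem_nil hs
    refine ih (dN + 1) (by rw [hdep]; push_cast; ring) (by omega) ?_ ?_ ?_ ?_ ?_ hnd ?_
    · intro x
      simp only [List.not_mem_nil, or_false]
      rw [hv x]
      constructor
      · rintro (h | h)
        · exact SeqLE_mono (Nat.le_succ dN) h
        · exact (hnxt x h).1
      · intro h
        by_cases hdn : SeqLE masks dN x
        · exact Or.inl hdn
        · right
          have hex : SeqEx masks (dN + 1) x :=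
            ⟨h, fun j hj hLE => hdn (SeqLE_mono (by omega) hLE)⟩
          rcases hgen x hex with h' | ⟨s, hs, _⟩
          · exact h'
          · exact absurd hs List.not_mem_nil
    · exact fun s hs => hnxt s hs
    · intro x hx
      right
      obtain ⟨hLE2, hmin2⟩ := hx
      rcases SeqLE_succ.1 hLE2 with h | ⟨m, hm, hLE1⟩
      · exact absurd h (hmin2 (dN + 1) (by omega))
      · refine ⟨PySem.Int.bxor x m, ?_, m, hm, bxor_cancel x m⟩
        have hex : SeqEx masks (dN + 1) (PySem.Int.bxor x m) := by
          refine ⟨hLE1, ?_⟩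
          intro j hj hLE
          refine hmin2 (j + 1) (by omega) ?_
          have := SeqLE_step hLE hm
          rwa [bxor_cancel] at this
        rcases hgen _ hex with h' | ⟨s, hs, _⟩
        · exact h'
        · exact absurd hs List.not_mem_nil
    · intro x hx; exact absurd hx List.not_mem_nil
    · exact List.not_mem_nil
    · simp only [List.length_nil, List.length_cons] at hfuel ⊢
      omega
  | case4 depth v fuel s rest nxt r nxt2 v2 hb =>
    intro dN hdep hle hv hF hgen hnxt hgoal hnd hfuel
    have hhit : ∃ m ∈ masks, PySem.Int.bxor s m = goal := by
      by_contra hno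
      push_neg at hno
      obtain ⟨nxt', v', heq, _⟩ := stepL_nohit depth nxt v hno hnd
      rw [heq] at hb
      exact absurd hb (by simp)
    have h1 := stepL_hit depth hhit nxt v
    rw [hb] at h1
    simp only at h1
    obtain ⟨m, hm, he⟩ := hhit
    have hsx := hF s (by simp)
    have hgle : SeqLE masks (dN + 1) goal := by
      have := SeqLE_step hsx.1 hm
      rwa [he] at this
    have hKle : K ≤ dN + 1 := by
      by_contra hcon
      exact (hK.2 (dN + 1) (by omega)) hgle
    rw [runL, hb]
    simp only [Option.some.injEq]
    have hr : r = depth + 1 := by simpa using h1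
    rw [hr, hdep]
    have hKeq : dN + 1 = K := by omega
    push_cast [← hKeq]
    ring
  | case5 depth v fuel s rest nxt nxt2 v2 hb ih =>
    intro dN hdep hle hv hF hgen hnxt hgoal hnd hfuel
    have hno : ∀ m ∈ masks, PySem.Int.bxor s m ≠ goal := by
      intro m hm he
      have h1 := stepL_hit depth ⟨m, hm, he⟩ nxt v
      rw [hb] at h1
      exact absurd h1 (by simp)
    obtain ⟨nxt', v', heq, hv', hn', hlen', hnd'⟩ := stepL_nohit depth nxt v hno hnd
    rw [heq] at hb
    simp only [Prod.mk.injEq] at hb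
    obtain ⟨-, h2', h3'⟩ := hb
    subst h2'; subst h3'
    rw [runL, heq]
    have hsex := hF s (by simp)
    refine ih dN hdep hle ?_ ?_ ?_ ?_ ?_ hnd' ?_
    · intro x
      rw [hv' x]
      constructor
      · rintro (h | ⟨m, hm, rfl⟩)
        · rcases (hv x).1 h with h' | h'
          · exact Or.inl h'
          · exact Or.inr ((hn' x).2 (Or.inl h'))
        · by_cases hxv : PySem.Int.bxor s m ∈ v
          · rcases (hv _).1 hxv with h' | h'
            · exact Or.inl h'
            · exact Or.inr ((hn' _).2 (Or.inl h'))
          · exact Or.inr ((hn' _).2 (Or.inr ⟨hxv, m, hm, rfl⟩))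
      · rintro (h | h)
        · exact Or.inl ((hv x).2 (Or.inl h))
        · rcases (hn' x).1 h with h' | ⟨hxv, m, hm, rfl⟩
          · exact Or.inl ((hv x).2 (Or.inr h'))
          · exact Or.inr ⟨m, hm, rfl⟩
    · exact fun s' hs' => hF s' (by simp [hs'])
    · intro x hx
      rcases hgen x hx with h | ⟨s', hs', m, hm, he⟩
      · exact Or.inl ((hn' x).2 (Or.inl h))
      · rcases List.mem_cons.1 hs' with rfl | hs'
        · by_cases hxv : x ∈ v
          · rcases (hv x).1 hxv with h' | h'
            · exact absurd h' (hx.2 dN (by omega))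
            · exact Or.inl ((hn' x).2 (Or.inl h'))
          · exact Or.inl ((hn' x).2 (Or.inr ⟨hxv, m, hm, he.symm⟩))
        · exact Or.inr ⟨s', hs', m, hm, he⟩
    · intro x hx
      rcases (hn' x).1 hx with h | ⟨hxv, m, hm, rfl⟩
      · exact hnxt x h
      · refine ⟨?_, ?_⟩
        · exact SeqLE_step hsex.1 hm
        · intro j hj hLE
          exact hxv ((hv _).2 (Or.inl (SeqLE_mono (by omega) hLE)))
    · intro hg'
      rcases (hn' goal).1 hg' with h | ⟨-, m, hm, he⟩
      · exact hgoal h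
      · exact hno m hm he.symm
    · simp only [List.length_cons] at hfuel ⊢
      omega

-- ---- the BFS returns none when the goal is unreachable ----
lemma runL_unreach {goal : Int} {masks : List Int}
    (hU : ∀ l : List Int, (∀ m ∈ l, m ∈ masks) → xorList l ≠ goal) :
    ∀ (fuel : Nat) (F nxt : List Int) (depth : Int) (v : PySem.Set Int),
      (∀ s ∈ F, ∃ l : List Int, (∀ m ∈ l, m ∈ masks) ∧ xorList l = s) →
      (∀ s ∈ nxt, ∃ l : List Int, (∀ m ∈ l, m ∈ masks) ∧ xorList l = s) →
      v.Nodup →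
      runL fuel goal masks F nxt depth v = none := by
  intro fuel F nxt depth v
  induction fuel, F, nxt, depth, v using runL.induct goal masks with
  | case1 x1 x2 x3 x4 => intro _ _ _; rw [runL]
  | case2 x1 x2 x3 => intro _ _ _; rw [runL]
  | case3 depth v fuel n ns ih =>
    intro hF hnxt hnd
    rw [runL]
    exact ih (fun s hs => hnxt s hs) (fun s hs => absurd hs List.not_mem_nil) hnd
  | case4 depth v fuel s rest nxt r nxt2 v2 hb =>
    intro hF hnxt hnd
    exfalso
    obtain ⟨l, hl, hxl⟩ := hF s (by simp)
    have hno : ∀ m ∈ masks, PySem.Int.bxor s m ≠ goal := by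
      intro m hm he
      refine hU (m :: l) ?_ ?_
      · intro a ha
        rcases List.mem_cons.1 ha with rfl | ha
        · exact hm
        · exact hl a ha
      · rw [xorList_cons, hxl, PySem.Int.bxor_comm, he]
    obtain ⟨nxt', v', heq, _⟩ := stepL_nohit depth nxt v hno hnd
    rw [heq] at hb
    exact absurd hb (by simp)
  | case5 depth v fuel s rest nxt nxt2 v2 hb ih =>
    intro hF hnxt hnd
    obtain ⟨l, hl, hxl⟩ := hF s (by simp)
    have hno : ∀ m ∈ masks, PySem.Int.bxor s m ≠ goal := by
      intro m hm he
      refine hU (m :: l) ?_ ?_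
      · intro a ha
        rcases List.mem_cons.1 ha with rfl | ha
        · exact hm
        · exact hl a ha
      · rw [xorList_cons, hxl, PySem.Int.bxor_comm, he]
    obtain ⟨nxt', v', heq, hv', hn', hlen', hnd'⟩ := stepL_nohit depth nxt v hno hnd
    rw [heq] at hb
    simp only [Prod.mk.injEq] at hb
    obtain ⟨-, h2', h3'⟩ := hb
    subst h2'; subst h3'
    rw [runL, heq]
    refine ih (fun s' hs' => hF s' (by simp [hs'])) ?_ hnd'
    intro x hx
    rcases (hn' x).1 hx with h | ⟨-, m, hm, rfl⟩
    · exact hnxt x h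
    · refine ⟨m :: l, ?_, ?_⟩
      · intro a ha
        rcases List.mem_cons.1 ha with rfl | ha
        · exact hm
        · exact hl a ha
      · rw [xorList_cons, hxl, PySem.Int.bxor_comm]

-- ---- A's value ----
lemma A_reach {goal : Int} {masks : List Int} {K : Nat} (n : Int)
    (hg : goal ≠ 0) (hK : SeqEx masks K goal) :
    min_presses goal masks n = some ((K : Nat) : Int) := by
  unfold min_presses
  rw [if_neg hg]
  have h := run_eq goal masks (2 ^ masks.length + 1) [0] [] 0 (PySem.Set.ofList [0])
  have hmap : (([0] : List Int).map (fun t => (t, (0 : Int))) ++ ([] : List Int).map (fun t => (t, (0 : Int) + 1))) = [((0 : Int), (0 : Int))] := by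
    simp
  rw [hmap] at h
  rw [h]
  have hK1 : 1 ≤ K := by
    rcases Nat.eq_zero_or_pos K with h0 | h0
    · exact absurd (SeqLE_zero.1 (h0 ▸ hK.1)) hg
    · exact h0
  refine runL_reach hK (2 ^ masks.length + 1) [0] [] 0 (PySem.Set.ofList [0]) 0 rfl (by omega) ?_ ?_ ?_ ?_ ?_ ?_ ?_
  · intro x
    rw [PySem.Set.mem_ofList]
    simp only [List.mem_singleton, List.not_mem_nil, or_false]
    rw [SeqLE_zero]
  · intro s hs
    rcases List.mem_singleton.1 hs with rfl
    exact ⟨SeqLE_zero.2 rfl, fun j hj => absurd hj (Nat.not_lt_zero j)⟩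
  · intro x hx
    right
    obtain ⟨hLE1, hmin1⟩ := hx
    rcases SeqLE_succ.1 hLE1 with h' | ⟨m, hm, hLE0⟩
    · exact absurd h' (hmin1 0 Nat.one_pos)
    · refine ⟨0, by simp, m, hm, ?_⟩
      have h0 : PySem.Int.bxor x m = 0 := SeqLE_zero.1 hLE0
      rw [zero_bxor]
      have := bxor_cancel x m
      rw [h0, zero_bxor] at this
      exact this
  · intro x hx; exact absurd hx List.not_mem_nil
  · exact List.not_mem_nil
  · exact PySem.Set.nodup_ofList [0]
  · have hlen : (PySem.Set.ofList ([0] : List Int)).length = 1 := rfl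
    simp only [List.length_singleton, List.length_nil, hlen]
    omega

lemma A_unreach {goal : Int} {masks : List Int} (n : Int) (hg : goal ≠ 0)
    (hU : ∀ l : List Int, (∀ m ∈ l, m ∈ masks) → xorList l ≠ goal) :
    min_presses goal masks n = none := by
  unfold min_presses
  rw [if_neg hg]
  have h := run_eq goal masks (2 ^ masks.length + 1) [0] [] 0 (PySem.Set.ofList [0])
  have hmap : (([0] : List Int).map (fun t => (t, (0 : Int))) ++ ([] : List Int).map (fun t => (t, (0 : Int) + 1))) = [((0 : Int), (0 : Int))] := by
    simp
  rw [hmap] at h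
  rw [h]
  refine runL_unreach hU (2 ^ masks.length + 1) [0] [] 0 (PySem.Set.ofList [0]) ?_ ?_ ?_
  · intro s hs
    rcases List.mem_singleton.1 hs with rfl
    exact ⟨[], by simp, rfl⟩
  · intro s hs; exact absurd hs List.not_mem_nil
  · exact PySem.Set.nodup_ofList [0]

-- ---- DP table characterization ----
def upd1 (b : PySem.Dict Int Int) (m x : Int) : Option Int :=
  match PySem.Dict.get? b x, PySem.Dict.get? b (PySem.Int.bxor x m) with
  | o, none => o
  | some c, some d => some (if d + 1 < c then d + 1 else c)
  | none, some d => some (d + 1)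

lemma dpInner_go (m : Int) (b0 : PySem.Dict Int Int) :
    ∀ (r : List (Int × Int)) (b : PySem.Dict Int Int) (done : List Int),
      (∀ p ∈ r, PySem.Dict.get? b0 p.1 = some p.2) →
      (r.map Prod.fst).Nodup →
      (∀ p ∈ r, p.1 ∉ done) →
      (∀ x, PySem.Dict.get? b x = if PySem.Int.bxor x m ∈ done then upd1 b0 m x else PySem.Dict.get? b0 x) →
      ∀ x, PySem.Dict.get? (dpInner m r b) x =
        if PySem.Int.bxor x m ∈ done ∨ PySem.Int.bxor x m ∈ r.map Prod.fst then upd1 b0 m x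
        else PySem.Dict.get? b0 x := by
  intro r
  induction r with
  | nil =>
    intro b done hsnap hnd hdisj hb x
    simp only [dpInner, List.map_nil, List.not_mem_nil, or_false]
    exact hb x
  | cons p rest ih =>
    obtain ⟨s, d⟩ := p
    intro b done hsnap hnd hdisj hb x
    simp only [dpInner]
    have hts : PySem.Int.bxor (PySem.Int.bxor s m) m = s := bxor_cancel s m
    have hbt : PySem.Dict.get? b (PySem.Int.bxor s m) = PySem.Dict.get? b0 (PySem.Int.bxor s m) := by
      rw [hb, if_neg]
      rw [hts]
      exact hdisj (s, d) (by simp)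
    have hs0 : PySem.Dict.get? b0 s = some d := hsnap (s, d) (by simp)
    have hnd1 : s ∉ rest.map Prod.fst := by
      have := hnd
      simp only [List.map_cons] at this
      exact (List.nodup_cons.1 this).1
    have hnd2 : (rest.map Prod.fst).Nodup := by
      have := hnd
      simp only [List.map_cons] at this
      exact (List.nodup_cons.1 this).2
    have hcond : ∀ y : Int, y ≠ PySem.Int.bxor s m →
        ((PySem.Int.bxor y m ∈ s :: done) ↔ (PySem.Int.bxor y m ∈ done)) := by
      intro y hy
      simp only [List.mem_cons]
      constructor
      · rintro (h | h)
        · exact absurd ((bxor_eq_iff _ _ _).1 h) hy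
        · exact h
      · exact Or.inr
    have happly : ∀ (b1 : PySem.Dict Int Int),
        (∀ y, PySem.Dict.get? b1 y =
          if y = PySem.Int.bxor s m then upd1 b0 m (PySem.Int.bxor s m) else PySem.Dict.get? b y) →
        PySem.Dict.get? (dpInner m rest b1) x =
          if PySem.Int.bxor x m ∈ done ∨ PySem.Int.bxor x m ∈ ((s, d) :: rest : List (Int × Int)).map Prod.fst
          then upd1 b0 m x else PySem.Dict.get? b0 x := by
      intro b1 hb1
      have hb1' : ∀ y, PySem.Dict.get? b1 y =
          if PySem.Int.bxor y m ∈ s :: done then upd1 b0 m y else PySem.Dict.get? b0 y := by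
        intro y
        by_cases hy : y = PySem.Int.bxor s m
        · subst hy
          rw [hb1 _, if_pos rfl, if_pos]
          rw [hts]
          simp
        · rw [hb1 y, if_neg hy, hb y]
          by_cases hmem : PySem.Int.bxor y m ∈ done
          · rw [if_pos hmem, if_pos ((hcond y hy).2 hmem)]
          · rw [if_neg hmem, if_neg (fun h => hmem ((hcond y hy).1 h))]
      rw [ih b1 (s :: done) (fun p hp => hsnap p (by simp [hp])) hnd2
        (fun p hp => by
          simp only [List.mem_cons, not_or]
          refine ⟨?_, hdisj p (by simp [hp])⟩
          intro hps
          exact hnd1 (hps ▸ List.mem_map_of_mem hp)) hb1' x]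
      refine if_congr ?_ rfl rfl
      simp only [List.map_cons, List.mem_cons]
      tauto
    cases hget : PySem.Dict.get? b (PySem.Int.bxor s m) with
    | none =>
      have hu : upd1 b0 m (PySem.Int.bxor s m) = some (d + 1) := by
        unfold upd1
        rw [hts, hs0, ← hbt, hget]
      refine happly _ ?_
      intro y
      show PySem.Dict.get? (PySem.Dict.insert b (PySem.Int.bxor s m) (d + 1)) y =
        if y = PySem.Int.bxor s m then upd1 b0 m (PySem.Int.bxor s m) else PySem.Dict.get? b y
      rw [PySem.Dict.get?_insert, hu]
    | some c =>
      have hb0t : PySem.Dict.get? b0 (PySem.Int.bxor s m) = some c := hbt ▸ hget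
      have hu : upd1 b0 m (PySem.Int.bxor s m) = some (if d + 1 < c then d + 1 else c) := by
        unfold upd1
        rw [hts, hs0, hb0t]
      refine happly _ ?_
      intro y
      show PySem.Dict.get? (if d + 1 < c then PySem.Dict.insert b (PySem.Int.bxor s m) (d + 1) else b) y =
        if y = PySem.Int.bxor s m then upd1 b0 m (PySem.Int.bxor s m) else PySem.Dict.get? b y
      by_cases hlt : d + 1 < c
      · rw [if_pos hlt, PySem.Dict.get?_insert, hu, if_pos hlt]
      · rw [if_neg hlt, hu, if_neg hlt]
        by_cases hy : y = PySem.Int.bxor s m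
        · subst hy
          rw [if_pos rfl, hget]
        · rw [if_neg hy]

lemma dpInner_keys_nodup (m : Int) :
    ∀ (r : List (Int × Int)) (b : PySem.Dict Int Int), b.keys.Nodup → (dpInner m r b).keys.Nodup := by
  intro r
  induction r with
  | nil => intro b hb; exact hb
  | cons p rest ih =>
    intro b hb
    obtain ⟨s, d⟩ := p
    simp only [dpInner]
    cases hg : PySem.Dict.get? b (PySem.Int.bxor s m) with
    | none => exact ih _ (PySem.Dict.nodup_keys_insert b _ _ hb)
    | some c =>
      by_cases hlt : d + 1 < c
      · simp only [if_pos hlt]; exact ih _ (PySem.Dict.nodup_keys_insert b _ _ hb)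
      · simp only [if_neg hlt]; exact ih _ hb

lemma dpStep_get? {m : Int} {b : PySem.Dict Int Int} (hnd : b.keys.Nodup) :
    ∀ x, PySem.Dict.get? (dpInner m b.items b) x = upd1 b m x := by
  intro x
  have hkeys : (b.items.map Prod.fst).Nodup := hnd
  have h := dpInner_go m b b.items b []
    (fun p hp => by
      obtain ⟨a, c⟩ := p
      exact PySem.Dict.get?_of_mem_items b hp hnd)
    hkeys
    (fun p _ => List.not_mem_nil)
    (fun y => by simp)
    x
  rw [h]
  by_cases hmem : PySem.Int.bxor x m ∈ b.items.map Prod.fst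
  · rw [if_pos (Or.inr hmem)]
  · rw [if_neg (by simp [hmem])]
    have hnone : PySem.Dict.get? b (PySem.Int.bxor x m) = none := by
      rw [PySem.Dict.get?_eq_none_iff_not_mem_keys]
      exact hmem
    unfold upd1
    rw [hnone]

def InvD (P : List Int) (b : PySem.Dict Int Int) : Prop :=
  ∀ x, (¬ Rch P x ∧ PySem.Dict.get? b x = none) ∨
       (∃ k, MnSub P x k ∧ PySem.Dict.get? b x = some ((k : Nat) : Int))

lemma sublist_concat_iff {l P : List Int} {m : Int} :
    List.Sublist l (P ++ [m]) ↔ List.Sublist l P ∨ ∃ l', l = l' ++ [m] ∧ List.Sublist l' P := by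
  rw [List.sublist_append_iff]
  constructor
  · rintro ⟨l1, l2, rfl, h1, h2⟩
    rcases List.sublist_singleton.1 h2 with rfl | rfl
    · exact Or.inl (by simpa using h1)
    · exact Or.inr ⟨l1, rfl, h1⟩
  · rintro (h | ⟨l', rfl, h⟩)
    · exact ⟨l, [], by simp, h, List.nil_sublist _⟩
    · exact ⟨l', [m], rfl, h, List.Sublist.refl _⟩

lemma Rch_concat {P : List Int} {m x : Int} :
    Rch (P ++ [m]) x ↔ Rch P x ∨ Rch P (PySem.Int.bxor x m) := by
  constructor
  · rintro ⟨l, hs, hx⟩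
    rcases sublist_concat_iff.1 hs with h | ⟨l', rfl, h⟩
    · exact Or.inl ⟨l, h, hx⟩
    · refine Or.inr ⟨l', h, ?_⟩
      rw [← hx, xorList_append]
      simp [xorList_cons, xorList_nil, bxor_cancel, PySem.Int.bxor_zero]
  · rintro (⟨l, hs, hx⟩ | ⟨l, hs, hx⟩)
    · exact ⟨l, hs.trans (List.sublist_append_left _ _), hx⟩
    · refine ⟨l ++ [m], sublist_concat_iff.2 (Or.inr ⟨l, rfl, hs⟩), ?_⟩
      rw [xorList_append, hx]
      simp [xorList_cons, xorList_nil, PySem.Int.bxor_zero, bxor_cancel]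

lemma SubLE_concat {P : List Int} {m x : Int} {k : Nat} :
    SubLE (P ++ [m]) k x ↔ SubLE P k x ∨ ∃ j, j + 1 ≤ k ∧ SubLE P j (PySem.Int.bxor x m) := by
  constructor
  · rintro ⟨l, hs, hl, hx⟩
    rcases sublist_concat_iff.1 hs with h | ⟨l', rfl, h⟩
    · exact Or.inl ⟨l, h, hl, hx⟩
    · refine Or.inr ⟨l'.length, by simpa using hl, l', h, le_refl _, ?_⟩
      rw [← hx, xorList_append]
      simp [xorList_cons, xorList_nil, bxor_cancel, PySem.Int.bxor_zero]
  · rintro (⟨l, hs, hl, hx⟩ | ⟨j, hj, l, hs, hl, hx⟩)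
    · exact ⟨l, hs.trans (List.sublist_append_left _ _), hl, hx⟩
    · refine ⟨l ++ [m], sublist_concat_iff.2 (Or.inr ⟨l, rfl, hs⟩), by simp; omega, ?_⟩
      rw [xorList_append, hx]
      simp [xorList_cons, xorList_nil, PySem.Int.bxor_zero, bxor_cancel]

lemma InvD_step {P : List Int} {b : PySem.Dict Int Int} {m : Int}
    (hInv : InvD P b) (hnd : b.keys.Nodup) : InvD (P ++ [m]) (dpInner m b.items b) := by
  intro x
  rw [dpStep_get? hnd x]
  unfold upd1
  rcases hInv x with ⟨hnr, hx0⟩ | ⟨kx, hkx, hx0⟩ <;>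
    rcases hInv (PySem.Int.bxor x m) with ⟨hnr2, hs0⟩ | ⟨ks, hks, hs0⟩ <;>
    rw [hx0, hs0]
  · left
    exact ⟨fun h => (Rch_concat.1 h).elim hnr hnr2, rfl⟩
  · right
    refine ⟨ks + 1, ⟨?_, ?_⟩, ?_⟩
    · exact SubLE_concat.2 (Or.inr ⟨ks, le_refl _, hks.1⟩)
    · intro j hj
      rcases SubLE_concat.1 hj with h | ⟨j', hj', h⟩
      · exact absurd (Rch_of_SubLE h) hnr
      · have := hks.2 j' h
        omega
    · push_cast
      rfl
  · right
    refine ⟨kx, ⟨?_, ?_⟩, rfl⟩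
    · exact SubLE_concat.2 (Or.inl hkx.1)
    · intro j hj
      rcases SubLE_concat.1 hj with h | ⟨j', hj', h⟩
      · exact hkx.2 j h
      · exact absurd (Rch_of_SubLE h) hnr2
  · right
    by_cases hlt : ks + 1 < kx
    · refine ⟨ks + 1, ⟨?_, ?_⟩, ?_⟩
      · exact SubLE_concat.2 (Or.inr ⟨ks, le_refl _, hks.1⟩)
      · intro j hj
        rcases SubLE_concat.1 hj with h | ⟨j', hj', h⟩
        · have := hkx.2 j h
          omega
        · have := hks.2 j' h
          omega
      · show some (if (ks : Int) + 1 < (kx : Int) then (ks : Int) + 1 else (kx : Int)) = some (((ks + 1 : Nat) : Int))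
        rw [if_pos (by exact_mod_cast hlt)]
        push_cast
        rfl
    · refine ⟨kx, ⟨?_, ?_⟩, ?_⟩
      · exact SubLE_concat.2 (Or.inl hkx.1)
      · intro j hj
        rcases SubLE_concat.1 hj with h | ⟨j', hj', h⟩
        · exact hkx.2 j h
        · have := hks.2 j' h
          omega
      · show some (if (ks : Int) + 1 < (kx : Int) then (ks : Int) + 1 else (kx : Int)) = some ((kx : Int))
        rw [if_neg (by exact_mod_cast hlt)]

lemma InvD_fold :
    ∀ (ms P : List Int) (b : PySem.Dict Int Int), InvD P b → b.keys.Nodup →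
      InvD (P ++ ms) (ms.foldl (fun b m => dpInner m (PySem.Dict.items b) b) b) := by
  intro ms
  induction ms with
  | nil => intro P b h _; simpa using h
  | cons m rest ih =>
    intro P b h hnd
    rw [List.foldl_cons, List.append_cons]
    exact ih (P ++ [m]) _ (InvD_step h hnd) (dpInner_keys_nodup m _ _ hnd)

lemma InvD_init : InvD [] (PySem.Dict.insert PySem.Dict.empty 0 0) := by
  intro x
  by_cases hx : x = (0 : Int)
  · subst hx
    refine Or.inr ⟨0, ⟨⟨[], List.nil_sublist _, by simp, rfl⟩, fun j _ => Nat.zero_le j⟩, ?_⟩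
    rw [PySem.Dict.get?_insert]
    simp
  · refine Or.inl ⟨?_, ?_⟩
    · rintro ⟨l, hs, hxl⟩
      rcases List.sublist_nil.1 hs with rfl
      exact hx hxl.symm
    · rw [PySem.Dict.get?_insert]
      simp [hx, PySem.Dict.get?_empty]

lemma B_char (goal : Int) (masks : List Int) (n : Int) :
    (¬ Rch masks goal ∧ min_presses_alt goal masks n = none) ∨
    (∃ k, MnSub masks goal k ∧ min_presses_alt goal masks n = some ((k : Nat) : Int)) := by
  have h := InvD_fold masks [] (PySem.Dict.insert PySem.Dict.empty 0 0) InvD_init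
    (PySem.Dict.nodup_keys_insert _ _ _ PySem.Dict.nodup_keys_empty)
  simp only [List.nil_append] at h
  rcases h goal with ⟨h1, h2⟩ | ⟨k, h1, h2⟩
  · left; exact ⟨h1, h2⟩
  · right; exact ⟨k, h1, h2⟩

-- ===== VERDICT (by name: the statement is the Claim_ definition above) =====
theorem min_presses_spec : Claim_equal_min_presses := by
  intro goal masks n _
  unfold Spec_min_presses
  by_cases hz : goal = 0
  · subst hz
    rcases B_char 0 masks n with ⟨hn, hB⟩ | ⟨k, hk, hB⟩
    · exact absurd ⟨[], List.nil_sublist _, rfl⟩ hn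
    · have hk0 : k = 0 := Nat.le_antisymm (hk.2 0 ⟨[], List.nil_sublist _, le_refl _, rfl⟩) (Nat.zero_le k)
      subst hk0
      rw [hB]
      unfold min_presses
      simp
  · rcases B_char goal masks n with ⟨hn, hB⟩ | ⟨k, hk, hB⟩
    · rw [hB]
      refine A_unreach n hz ?_
      intro l hl hx
      obtain ⟨l', hs, _, hxl⟩ := seq_to_sub l.length l (le_refl _) hl
      exact hn ⟨l', hs, hxl.trans hx⟩
    · rw [hB]
      refine A_reach n hz ⟨SeqLE_iff_SubLE.2 hk.1, ?_⟩
      intro j hj hLE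
      exact absurd (hk.2 j (SeqLE_iff_SubLE.1 hLE)) (by omega)
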